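-- pv_equiv track=rewrite | github.com/c0pper/mirc0_mood_representation | mood_representation/utils.py | get_missing_tuples
-- ===== SOURCE A (Python) =====
-- def get_missing_tuples(list_of_tuples, stop, start=0):
--     newList = []
--     for tup in list_of_tuples:
--         if tup[0] > start:
--             newList.append((start, tup[0]))
--         start = tup[1] +1
--     # add any left over values
--     if start < stop:
--         newList.append((start, stop))
--     return newList
-- ===== SOURCE B (Python) =====
-- def get_missing_tuples(list_of_tuples, stop, start=0):
--     lefts = [start] + [t[1] + 1 for t in list_of_tuples]
--     rights = [t[0] for t in list_of_tuples] + [stop]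
--     return [(l, r) for l, r in zip(lefts, rights) if l < r]
-- ===== Notes on version B (the rewrite author's own statement) =====
-- stated objective: simpler
-- what changed: Replaces the loop threading a running `start` accumulator with two boundary lists (gap starts and gap ends) combined by one filtered zip, so the two special cases collapse into a single l < r test.
import Mathlib
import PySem

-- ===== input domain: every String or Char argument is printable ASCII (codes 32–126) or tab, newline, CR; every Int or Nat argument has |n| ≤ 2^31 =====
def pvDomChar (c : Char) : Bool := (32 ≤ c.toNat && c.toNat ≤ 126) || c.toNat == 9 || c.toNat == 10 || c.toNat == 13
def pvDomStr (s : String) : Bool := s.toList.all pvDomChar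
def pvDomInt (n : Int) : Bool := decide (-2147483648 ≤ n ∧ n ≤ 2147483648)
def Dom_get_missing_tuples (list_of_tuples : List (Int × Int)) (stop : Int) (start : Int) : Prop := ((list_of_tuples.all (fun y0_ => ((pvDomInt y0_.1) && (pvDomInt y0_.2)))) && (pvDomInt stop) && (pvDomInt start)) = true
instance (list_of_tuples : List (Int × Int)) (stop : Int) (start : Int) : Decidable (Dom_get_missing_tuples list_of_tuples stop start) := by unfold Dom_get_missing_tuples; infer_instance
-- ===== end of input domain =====

-- B replaces A's loop threading a running `start` with two boundary lists joined by one filtered zip (objective: simpler).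

-- ===== PORT A =====
def get_missing_tuples (list_of_tuples : List (Int × Int)) (stop : Int) (start : Int) : List (Int × Int) :=
  let res := list_of_tuples.foldl
    (fun (st : Int × List (Int × Int)) tup =>
      (tup.2 + 1, if tup.1 > st.1 then st.2 ++ [(st.1, tup.1)] else st.2))
    (start, [])
  if res.1 < stop then res.2 ++ [(res.1, stop)] else res.2

-- ===== PORT B =====
def get_missing_tuples_alt (list_of_tuples : List (Int × Int)) (stop : Int) (start : Int) : List (Int × Int) :=
  let lefts := start :: list_of_tuples.map (fun t => t.2 + 1)
  let rights := list_of_tuples.map (fun t => t.1) ++ [stop]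
  (lefts.zip rights).filter (fun p => p.1 < p.2)

-- ===== PRECONDITION & SPEC =====
def Spec_get_missing_tuples (list_of_tuples : List (Int × Int)) (stop : Int) (start : Int) (out : List (Int × Int)) : Prop := out = get_missing_tuples_alt list_of_tuples stop start
instance (list_of_tuples : List (Int × Int)) (stop : Int) (start : Int) (out : List (Int × Int)) : Decidable (Spec_get_missing_tuples list_of_tuples stop start out) := by unfold Spec_get_missing_tuples; infer_instance

-- ===== CLAIM (what is proved, stated in full; the proofs are below) =====
def Claim_equal_get_missing_tuples : Prop := ∀ (list_of_tuples : List (Int × Int)) (stop : Int) (start : Int), Dom_get_missing_tuples list_of_tuples stop start → Spec_get_missing_tuples list_of_tuples stop start (get_missing_tuples list_of_tuples stop start)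

-- ===== LEMMAS AND PROOFS =====

-- Loop invariant: A's fold from state (start, acc) plus the trailing check yields acc ++ B's result.
theorem gmt_fold_eq (l : List (Int × Int)) (stop : Int) :
    ∀ (start : Int) (acc : List (Int × Int)),
      (let res := l.foldl
        (fun (st : Int × List (Int × Int)) tup =>
          (tup.2 + 1, if tup.1 > st.1 then st.2 ++ [(st.1, tup.1)] else st.2))
        (start, acc)
       if res.1 < stop then res.2 ++ [(res.1, stop)] else res.2)
      = acc ++ get_missing_tuples_alt l stop start := by
  induction l with
  | nil =>
      intro start acc
      simp only [List.foldl_nil, get_missing_tuples_alt, List.map_nil, List.nil_append,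
        List.zip_cons_cons, List.zip_nil_right, List.filter_cons, List.filter_nil]
      by_cases h : start < stop
      · simp [h]
      · simp [h]
  | cons a t ih =>
      intro start acc
      simp only [List.foldl_cons]
      rw [ih (a.2 + 1)]
      simp only [get_missing_tuples_alt, List.map_cons, List.cons_append,
        List.zip_cons_cons, List.filter_cons, gt_iff_lt]
      by_cases h : start < a.1
      · simp [h, List.append_assoc]
      · simp [h]

theorem get_missing_tuples_spec : Claim_equal_get_missing_tuples := by
  intro l stop start _
  unfold Spec_get_missing_tuples get_missing_tuples
  simpa using gmt_fold_eq l stop start []
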